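-- pv_equiv track=rewrite | github.com/NewonOnGit/self-reference-seed | experiments/classifier.py | forcing_dominator
-- ===== SOURCE A (Python) =====
-- def forcing_dominator(node_name, rev, all_nodes, predictions, apex_set):
--     """Is this node a forcing dominator?
--     I.e., does removing it disconnect any prediction from apex?"""
--     # Build adjacency without this node
--     for pred in predictions:
--         # BFS from apex through rev, skipping node_name
--         visited = set()
--         queue = list(apex_set)
--         found = False
--         while queue:
--             current = queue.pop(0)
--             if current == pred:
--                 found = True
--                 break
--             if current in visited or current == node_name:
--                 continue
--             visited.add(current)
--             for child in rev.get(current, set()):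
--                 queue.append(child)
--         if not found:
--             return True
--     return False
-- ===== SOURCE B (Python) =====
-- def forcing_dominator(node_name, rev, all_nodes, predictions, apex_set):
--     """Is this node a forcing dominator?
--     One traversal from apex_set (skipping node_name's outgoing expansion)
--     computes the set of reachable nodes; then every prediction is checked
--     against that set.  O(V+E+P) instead of one BFS per prediction."""
--     reach = set()
--     stack = list(apex_set)
--     while stack:
--         cur = stack.pop()
--         if cur in reach:
--             continue
--         reach.add(cur)
--         if cur != node_name:
--             stack.extend(rev.get(cur, set()))
--     return any(p not in reach for p in predictions)
-- ===== Notes on version B (the rewrite author's own statement) =====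
-- stated objective: faster
-- what changed: A runs a fresh BFS from apex_set for every prediction; B performs a single traversal from apex_set (skipping node_name's expansion) to build the reachable set once and then checks all predictions against it.
import Mathlib
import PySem

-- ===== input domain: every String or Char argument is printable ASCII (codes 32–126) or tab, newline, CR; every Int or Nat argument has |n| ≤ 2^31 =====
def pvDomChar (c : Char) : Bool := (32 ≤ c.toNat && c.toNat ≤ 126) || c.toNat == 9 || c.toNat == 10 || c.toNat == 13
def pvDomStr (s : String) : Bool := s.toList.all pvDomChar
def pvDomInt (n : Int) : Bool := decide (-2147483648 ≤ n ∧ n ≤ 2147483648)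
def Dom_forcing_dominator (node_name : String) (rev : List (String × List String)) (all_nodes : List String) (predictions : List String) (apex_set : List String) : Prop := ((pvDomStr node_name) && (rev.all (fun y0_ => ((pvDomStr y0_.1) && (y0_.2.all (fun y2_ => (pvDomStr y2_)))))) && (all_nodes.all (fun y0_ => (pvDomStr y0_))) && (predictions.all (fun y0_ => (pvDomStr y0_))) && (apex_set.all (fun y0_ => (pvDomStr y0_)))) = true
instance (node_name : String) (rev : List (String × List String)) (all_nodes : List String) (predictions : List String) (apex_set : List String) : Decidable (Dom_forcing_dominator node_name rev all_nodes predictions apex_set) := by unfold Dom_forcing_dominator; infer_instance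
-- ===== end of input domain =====

-- B replaces A's per-prediction BFS by ONE traversal from apex_set that builds the
-- reachable set (skipping node_name's expansion) and then checks every prediction
-- against it; a timing run measures whether this is faster.

-- shared primitive: Python's rev.get(c, set()) on the association list (first match)
def dget (rev : List (String × List String)) (c : String) : List String :=
  match rev with
  | [] => []
  | (k, v) :: rest => if k = c then v else dget rest c

-- finite universe used only as a GHOST termination bound for the two loops
def pvU (rev : List (String × List String)) (apex : List String) : Finset String :=
  (apex ++ rev.flatMap Prod.snd).toFinset

theorem dget_mem_pvU (rev : List (String × List String)) (apex : List String)
    (c x : String) (hx : x ∈ dget rev c) : x ∈ pvU rev apex := by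
  simp only [pvU, List.mem_toFinset, List.mem_append, List.mem_flatMap]
  right
  induction rev with
  | nil => simp [dget] at hx
  | cons p rest ih =>
    simp only [dget] at hx
    split at hx
    · exact ⟨p, List.mem_cons_self .., hx⟩
    · obtain ⟨q, hq, hxq⟩ := ih hx
      exact ⟨q, List.mem_cons_of_mem _ hq, hxq⟩

theorem apex_mem_pvU (rev : List (String × List String)) (apex : List String)
    (x : String) (hx : x ∈ apex) : x ∈ pvU rev apex := by
  simp [pvU, hx]

theorem card_sdiff_lt (U : Finset String) (V : List String) (c : String)
    (hcU : c ∈ U) (hcV : c ∉ V) :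
    (U \ (V ++ [c]).toFinset).card < (U \ V.toFinset).card := by
  apply Finset.card_lt_card
  constructor
  · intro x hx
    simp only [Finset.mem_sdiff, List.toFinset_append, List.mem_toFinset,
      Finset.mem_union, List.toFinset_cons, List.toFinset_nil] at hx ⊢
    refine ⟨hx.1, fun h => hx.2 ?_⟩
    simp [h]
  · intro hsub
    have hc : c ∈ U \ V.toFinset := by simp [Finset.mem_sdiff, hcU, hcV]
    have := hsub hc
    simp [Finset.mem_sdiff, List.toFinset_append] at this

-- ===== PORT A =====
-- the inner while-loop of A: BFS from `queue` with early break on `pred`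
def bfsA (n pred : String) (rev : List (String × List String)) (U : Finset String)
    (visited : List String) (queue : List String)
    (hq : ∀ x ∈ queue, x ∈ U)
    (hrev : ∀ c, ∀ x ∈ dget rev c, x ∈ U) : Bool :=
  match queue with
  | [] => false
  | c :: q =>
    if c = pred then true
    else if h2 : c ∈ visited ∨ c = n then
      bfsA n pred rev U visited q (fun x hx => hq x (List.mem_cons_of_mem _ hx)) hrev
    else
      bfsA n pred rev U (visited ++ [c]) (q ++ dget rev c)
        (fun x hx => (List.mem_append.1 hx).elim
          (fun h => hq x (List.mem_cons_of_mem _ h)) (fun h => hrev c x h)) hrev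
termination_by ((U \ visited.toFinset).card, queue.length)
decreasing_by
  · exact Prod.Lex.right _ (Nat.lt_succ_self _)
  · exact Prod.Lex.left _ _
      (card_sdiff_lt U visited c (hq c (List.mem_cons_self ..)) (fun h => h2 (Or.inl h)))

-- the outer for-loop of A over predictions, with early return True
def loopA (n : String) (rev : List (String × List String)) (U : Finset String)
    (apex preds : List String)
    (ha : ∀ x ∈ apex, x ∈ U) (hrev : ∀ c, ∀ x ∈ dget rev c, x ∈ U) : Bool :=
  match preds with
  | [] => false
  | p :: ps =>
    if !(bfsA n p rev U [] apex ha hrev) then true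
    else loopA n rev U apex ps ha hrev

def forcing_dominator (node_name : String) (rev : List (String × List String)) (all_nodes : List String) (predictions : List String) (apex_set : List String) : Bool :=
  loopA node_name rev (pvU rev apex_set) apex_set predictions
    (apex_mem_pvU rev apex_set) (fun c x hx => dget_mem_pvU rev apex_set c x hx)

-- ===== PORT B =====
-- B's single traversal: stack-based, pops from the END (Python list.pop())
def dfsB (n : String) (rev : List (String × List String)) (U : Finset String)
    (reach : List String) (stack : List String)
    (hs : ∀ x ∈ stack, x ∈ U)
    (hrev : ∀ c, ∀ x ∈ dget rev c, x ∈ U) : List String :=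
  match h : stack.getLast? with
  | none => reach
  | some c =>
    if hc : c ∈ reach then
      dfsB n rev U reach stack.dropLast
        (fun x hx => hs x (List.dropLast_subset _ hx)) hrev
    else if c = n then
      dfsB n rev U (reach ++ [c]) stack.dropLast
        (fun x hx => hs x (List.dropLast_subset _ hx)) hrev
    else
      dfsB n rev U (reach ++ [c]) (stack.dropLast ++ dget rev c)
        (fun x hx => (List.mem_append.1 hx).elim
          (fun hx' => hs x (List.dropLast_subset _ hx')) (fun hx' => hrev c x hx')) hrev
termination_by ((U \ reach.toFinset).card, stack.length)
decreasing_by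
  · exact Prod.Lex.right _ (by
      have hne : stack ≠ [] := by intro hnil; simp [hnil] at h
      have : 0 < stack.length := List.length_pos_iff.2 hne
      simp [List.length_dropLast]; omega)
  · exact Prod.Lex.left _ _
      (card_sdiff_lt U reach c (hs c (List.mem_of_getLast? h)) hc)
  · exact Prod.Lex.left _ _
      (card_sdiff_lt U reach c (hs c (List.mem_of_getLast? h)) hc)

-- the reachable set B builds once (Python's `reach` after the while loop)
def reachB (node_name : String) (rev : List (String × List String)) (apex_set : List String) : List String :=
  dfsB node_name rev (pvU rev apex_set) [] apex_set
    (apex_mem_pvU rev apex_set) (fun c x hx => dget_mem_pvU rev apex_set c x hx)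

def forcing_dominator_alt (node_name : String) (rev : List (String × List String)) (all_nodes : List String) (predictions : List String) (apex_set : List String) : Bool :=
  predictions.any (fun p => !((reachB node_name rev apex_set).contains p))

-- ===== PRECONDITION & SPEC =====
def Spec_forcing_dominator (node_name : String) (rev : List (String × List String)) (all_nodes : List String) (predictions : List String) (apex_set : List String) (out : Bool) : Prop := out = forcing_dominator_alt node_name rev all_nodes predictions apex_set
instance (node_name : String) (rev : List (String × List String)) (all_nodes : List String) (predictions : List String) (apex_set : List String) (out : Bool) : Decidable (Spec_forcing_dominator node_name rev all_nodes predictions apex_set out) := by unfold Spec_forcing_dominator; infer_instance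

-- ===== CLAIM (what is proved, stated in full; the proofs are below) =====
def Claim_equal_forcing_dominator : Prop := ∀ (node_name : String) (rev : List (String × List String)) (all_nodes : List String) (predictions : List String) (apex_set : List String), Dom_forcing_dominator node_name rev all_nodes predictions apex_set → Spec_forcing_dominator node_name rev all_nodes predictions apex_set (forcing_dominator node_name rev all_nodes predictions apex_set)

-- ===== LEMMAS AND PROOFS =====

-- reachability from x to z along rev-edges, where every node that is EXPANDED
-- (i.e. every node on the path except the endpoint z) avoids V and n
inductive Avoid (rev : List (String × List String)) (n : String) (V : List String) : String → String → Prop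
  | refl (x : String) : Avoid rev n V x x
  | step {x y z : String} (hv : x ∉ V) (hn : x ≠ n) (hy : y ∈ dget rev x)
      (h : Avoid rev n V y z) : Avoid rev n V x z

theorem avoid_weaken {rev : List (String × List String)} {n : String} {V V' : List String}
    {x z : String} (hsub : ∀ a, a ∈ V' → a ∈ V) (h : Avoid rev n V x z) :
    Avoid rev n V' x z := by
  induction h with
  | refl => exact Avoid.refl _
  | step hv hn hy _ ih => exact Avoid.step (fun hx => hv (hsub _ hx)) hn hy ih

theorem avoid_insert {rev : List (String × List String)} {n : String} {V : List String}
    {x z : String} (c : String) (h : Avoid rev n V x z) :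
    z = c ∨ Avoid rev n (V ++ [c]) x z ∨ ∃ y ∈ dget rev c, Avoid rev n (V ++ [c]) y z := by
  induction h with
  | refl x =>
    by_cases hx : x = c
    · exact Or.inl hx
    · exact Or.inr (Or.inl (Avoid.refl _))
  | @step x y z hv hn hy _ ih =>
    rcases ih with h1 | h2 | h3
    · exact Or.inl h1
    · by_cases hx : x = c
      · exact Or.inr (Or.inr ⟨y, hx ▸ hy, h2⟩)
      · exact Or.inr (Or.inl (Avoid.step (by simp [hv, hx]) hn hy h2))
    · exact Or.inr (Or.inr h3)

theorem avoid_insert_n {rev : List (String × List String)} {n : String} {V : List String}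
    {x z : String} (h : Avoid rev n V x z) :
    z = n ∨ Avoid rev n (V ++ [n]) x z := by
  induction h with
  | refl x =>
    by_cases hx : x = n
    · exact Or.inl hx
    · exact Or.inr (Avoid.refl _)
  | @step x y z hv hn hy _ ih =>
    rcases ih with h1 | h2
    · exact Or.inl h1
    · exact Or.inr (Avoid.step (by simp [hv, hn]) hn hy h2)

-- A's BFS finds pred iff some queue element Avoid-reaches pred
theorem bfsA_spec (n pred : String) (rev : List (String × List String)) (U : Finset String)
    (visited queue : List String) (hq : ∀ x ∈ queue, x ∈ U)
    (hrev : ∀ c, ∀ x ∈ dget rev c, x ∈ U)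
    (hp : pred ∉ visited)
    (hinv : ∀ c ∈ visited, ∀ y ∈ dget rev c, y ∈ visited ∨ y ∈ queue ∨ y = n) :
    bfsA n pred rev U visited queue hq hrev = true ↔
      ∃ x ∈ queue, Avoid rev n visited x pred := by
  revert hp hinv
  fun_induction bfsA n pred rev U visited queue hq hrev with
  | case1 _ _ _ => intro _ _; simp
  | case2 visited q _ _ =>
    intro _ _
    exact iff_of_true rfl ⟨pred, List.mem_cons_self .., Avoid.refl _⟩
  | case3 visited c q _ hcp hskip _ ih =>
    intro hp hinv
    rw [ih hp (fun a ha y hy => by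
      rcases hinv a ha y hy with h1 | h2 | h3
      · exact Or.inl h1
      · rcases List.mem_cons.1 h2 with rfl | h2'
        · rcases hskip with h | h
          · exact Or.inl h
          · exact Or.inr (Or.inr h)
        · exact Or.inr (Or.inl h2')
      · exact Or.inr (Or.inr h3))]
    constructor
    · rintro ⟨x, hx, ha⟩; exact ⟨x, List.mem_cons_of_mem _ hx, ha⟩
    · rintro ⟨x, hx, ha⟩
      rcases List.mem_cons.1 hx with he | hx'
      · subst he
        cases ha with
        | refl => exact absurd rfl hcp
        | step hv hn _ _ =>
          rcases hskip with h | h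
          · exact absurd h hv
          · exact absurd h hn
      · exact ⟨x, hx', ha⟩
  | case4 visited c q _ hcp hexp _ ih =>
    intro hp hinv
    obtain ⟨hcv, hcn⟩ := not_or.1 hexp
    have hp' : pred ∉ visited ++ [c] := by
      simp only [List.mem_append, List.mem_singleton]
      rintro (h | rfl)
      · exact hp h
      · exact hcp rfl
    have hinv' : ∀ a ∈ visited ++ [c], ∀ y ∈ dget rev a,
        y ∈ visited ++ [c] ∨ y ∈ q ++ dget rev c ∨ y = n := by
      intro a ha y hy
      rcases List.mem_append.1 ha with ha' | ha'
      · rcases hinv a ha' y hy with h1 | h2 | h3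
        · exact Or.inl (List.mem_append_left _ h1)
        · rcases List.mem_cons.1 h2 with rfl | h2'
          · exact Or.inl (List.mem_append_right _ (List.mem_singleton.2 rfl))
          · exact Or.inr (Or.inl (List.mem_append_left _ h2'))
        · exact Or.inr (Or.inr h3)
      · rcases List.mem_singleton.1 ha' with rfl
        exact Or.inr (Or.inl (List.mem_append_right _ hy))
    rw [ih hp' hinv']
    have hw : ∀ a, a ∈ visited → a ∈ visited ++ [c] := fun a ha => List.mem_append_left _ ha
    constructor
    · rintro ⟨x, hx, ha⟩
      have ha' := avoid_weaken hw ha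
      rcases List.mem_append.1 hx with hx' | hx'
      · exact ⟨x, List.mem_cons_of_mem _ hx', ha'⟩
      · exact ⟨c, List.mem_cons_self .., Avoid.step hcv hcn hx' ha'⟩
    · rintro ⟨x, hx, ha⟩
      rcases List.mem_cons.1 hx with he | hx'
      · subst he
        cases ha with
        | refl => exact absurd rfl hcp
        | step _ _ hy hrest =>
          rcases avoid_insert x hrest with h1 | h2 | ⟨w, hw1, hw2⟩
          · exact absurd h1.symm hcp
          · exact ⟨_, List.mem_append_right _ hy, h2⟩
          · exact ⟨w, List.mem_append_right _ hw1, hw2⟩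
      · rcases avoid_insert c ha with h1 | h2 | ⟨w, hw1, hw2⟩
        · exact absurd h1.symm hcp
        · exact ⟨x, List.mem_append_left _ hx', h2⟩
        · exact ⟨w, List.mem_append_right _ hw1, hw2⟩

-- B's traversal computes exactly the Avoid-closure of the stack over reach
theorem dfsB_spec (n : String) (rev : List (String × List String)) (U : Finset String)
    (reach stack : List String) (hs : ∀ x ∈ stack, x ∈ U)
    (hrev : ∀ c, ∀ x ∈ dget rev c, x ∈ U) (x : String) :
    x ∈ dfsB n rev U reach stack hs hrev ↔
      x ∈ reach ∨ ∃ y ∈ stack, Avoid rev n reach y x := by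
  fun_induction dfsB n rev U reach stack hs hrev with
  | case1 reach stack _ hnone =>
    have : stack = [] := List.getLast?_eq_none_iff.1 hnone
    subst this; simp
  | case2 reach stack _ c hlast hcr ih =>
    have hstack : stack = stack.dropLast ++ [c] := by
      obtain ⟨l', rfl⟩ := List.getLast?_eq_some_iff.1 hlast
      simp
    rw [ih]
    constructor
    · rintro (h | ⟨y, hy, ha⟩)
      · exact Or.inl h
      · exact Or.inr ⟨y, by rw [hstack]; exact List.mem_append_left _ hy, ha⟩
    · rintro (h | ⟨y, hy, ha⟩)
      · exact Or.inl h
      · rw [hstack] at hy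
        rcases List.mem_append.1 hy with hy' | hy'
        · exact Or.inr ⟨y, hy', ha⟩
        · have he : y = c := List.mem_singleton.1 hy'
          subst he
          cases ha with
          | refl => exact Or.inl hcr
          | step hv _ _ _ => exact absurd hcr hv
  | case3 reach stack _ hlast hcr ih =>
    -- the popped element equals n : added to reach, not expanded
    have hstack : stack = stack.dropLast ++ [n] := by
      obtain ⟨l', rfl⟩ := List.getLast?_eq_some_iff.1 hlast
      simp
    rw [ih]
    have hw : ∀ a, a ∈ reach → a ∈ reach ++ [n] := fun a ha => List.mem_append_left _ ha
    constructor
    · rintro (h | ⟨y, hy, ha⟩)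
      · rcases List.mem_append.1 h with h' | h'
        · exact Or.inl h'
        · have he : x = n := List.mem_singleton.1 h'
          exact Or.inr ⟨n, by rw [hstack]; exact List.mem_append_right _ (by simp),
            by rw [he]; exact Avoid.refl _⟩
      · exact Or.inr ⟨y, by rw [hstack]; exact List.mem_append_left _ hy,
          avoid_weaken hw ha⟩
    · rintro (h | ⟨y, hy, ha⟩)
      · exact Or.inl (List.mem_append_left _ h)
      · rw [hstack] at hy
        rcases List.mem_append.1 hy with hy' | hy'
        · rcases avoid_insert_n ha with h1 | h2
          · exact Or.inl (List.mem_append_right _ (by simp [h1]))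
          · exact Or.inr ⟨y, hy', h2⟩
        · have he : y = n := List.mem_singleton.1 hy'
          subst he
          cases ha with
          | refl => exact Or.inl (List.mem_append_right _ (by simp))
          | step _ hn _ _ => exact absurd rfl hn
  | case4 reach stack _ c hlast hcr hcn ih =>
    have hstack : stack = stack.dropLast ++ [c] := by
      obtain ⟨l', rfl⟩ := List.getLast?_eq_some_iff.1 hlast
      simp
    rw [ih]
    have hw : ∀ a, a ∈ reach → a ∈ reach ++ [c] := fun a ha => List.mem_append_left _ ha
    constructor
    · rintro (h | ⟨y, hy, ha⟩)
      · rcases List.mem_append.1 h with h' | h'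
        · exact Or.inl h'
        · have he : x = c := List.mem_singleton.1 h'
          exact Or.inr ⟨c, by rw [hstack]; exact List.mem_append_right _ (by simp),
            by rw [he]; exact Avoid.refl _⟩
      · rcases List.mem_append.1 hy with hy' | hy'
        · exact Or.inr ⟨y, by rw [hstack]; exact List.mem_append_left _ hy',
            avoid_weaken hw ha⟩
        · exact Or.inr ⟨c, by rw [hstack]; exact List.mem_append_right _ (by simp),
            Avoid.step hcr hcn hy' (avoid_weaken hw ha)⟩
    · rintro (h | ⟨y, hy, ha⟩)
      · exact Or.inl (List.mem_append_left _ h)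
      · rw [hstack] at hy
        rcases List.mem_append.1 hy with hy' | hy'
        · rcases avoid_insert c ha with h1 | h2 | ⟨w, hw1, hw2⟩
          · exact Or.inl (List.mem_append_right _ (by simp [h1]))
          · exact Or.inr ⟨y, List.mem_append_left _ hy', h2⟩
          · exact Or.inr ⟨w, List.mem_append_right _ hw1, hw2⟩
        · have he : y = c := List.mem_singleton.1 hy'
          subst he
          cases ha with
          | refl => exact Or.inl (List.mem_append_right _ (by simp))
          | step _ _ hy2 hrest =>
            rcases avoid_insert y hrest with h1 | h2 | ⟨w, hw1, hw2⟩
            · exact Or.inl (List.mem_append_right _ (by simp [h1]))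
            · exact Or.inr ⟨_, List.mem_append_right _ hy2, h2⟩
            · exact Or.inr ⟨w, List.mem_append_right _ hw1, hw2⟩


theorem loopA_eq (node_name : String) (rev : List (String × List String))
    (apex_set : List String) (preds : List String) :
    loopA node_name rev (pvU rev apex_set) apex_set preds
      (apex_mem_pvU rev apex_set) (fun c x hx => dget_mem_pvU rev apex_set c x hx) =
    preds.any (fun p => !((reachB node_name rev apex_set).contains p)) := by
  induction preds with
  | nil => simp [loopA]
  | cons p ps ih =>
    simp only [loopA, List.any_cons]
    have hb := bfsA_spec node_name p rev (pvU rev apex_set) [] apex_set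
      (apex_mem_pvU rev apex_set) (fun c x hx => dget_mem_pvU rev apex_set c x hx)
      (by simp) (by simp)
    have hd := dfsB_spec node_name rev (pvU rev apex_set) [] apex_set
      (apex_mem_pvU rev apex_set) (fun c x hx => dget_mem_pvU rev apex_set c x hx) p
    by_cases hfound : bfsA node_name p rev (pvU rev apex_set) [] apex_set
        (apex_mem_pvU rev apex_set) (fun c x hx => dget_mem_pvU rev apex_set c x hx) = true
    · have hmem : p ∈ reachB node_name rev apex_set := by
        unfold reachB; rw [hd]; right; simpa using hb.1 hfound
      simp [hfound, hmem, ih]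
    · have hnmem : p ∉ reachB node_name rev apex_set := by
        unfold reachB; rw [hd]
        rintro (h | ⟨y, hy, ha⟩)
        · simp at h
        · exact hfound (hb.2 ⟨y, hy, ha⟩)
      simp [hfound, hnmem]

-- ===== VERDICT (by name: the statement is the Claim_ definition above) =====
theorem forcing_dominator_spec : Claim_equal_forcing_dominator := by
  intro node_name rev all_nodes predictions apex_set _
  unfold Spec_forcing_dominator forcing_dominator forcing_dominator_alt
  exact loopA_eq node_name rev apex_set predictions
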